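-- pv_equiv track=rewrite | github.com/manuelferrario/Seam-Craving | source/BT_PD.py | encontrar_seam_backtracking
-- ===== SOURCE A (Python) =====
-- import math
--
-- def _func_aux_bt(energia, fila, columna_previa, camino_actual, energia_actual, mejor):
--
--     """
--     mejor es una lista de un elemento [mejor_energia, mejor_camino]
--     para poder modificarla dentro de la recursion (simula pasar por referencia).
--     """
--
--     # Caso base: llegamos al final de la matriz
--     if fila == len(energia):
--         if energia_actual < mejor[0]:
--             mejor[0] = energia_actual
--             mejor[1] = camino_actual[:]  # copia del camino actual
--         return
--
--     # Tres opciones: izquierda (-1), recto (0), derecha (+1)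
--     for i in [-1, 0, 1]:
--         columna = columna_previa + i
--
--         # Chequeo de bordes
--         if columna < 0 or columna >= len(energia[fila]):
--             continue
--
--         # Poda por optimalidad
--         if mejor[0] <= energia_actual + energia[fila][columna]:
--             continue
--
--         camino_actual.append(columna)
--         _func_aux_bt(energia, fila + 1, columna, camino_actual, energia_actual + energia[fila][columna], mejor)
--         camino_actual.pop()  # Backtrack
--
-- def encontrar_seam_backtracking(energia):
--     if not energia or not energia[0]:
--         return []
--
--     mejor = [math.inf, []]  # [mejor_energia, mejor_camino]
--
--     for i in range(len(energia[0])):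
--         camino_actual = [i]
--         energia_actual = energia[0][i]
--         _func_aux_bt(energia, 1, i, camino_actual, energia_actual, mejor)
--
--     return mejor[1]
-- ===== SOURCE B (Python) =====
-- def encontrar_seam_backtracking(energia):
--     # Iterative depth-first branch-and-bound with an explicit stack instead of
--     # recursion: each stack frame carries its own (immutable) partial path and
--     # accumulated energy; the bound is tested when a frame is popped, which is
--     # exactly the moment the recursive version would descend into it.
--     if not energia or not energia[0]:
--         return []
--     n = len(energia)
--     best = None  # (energy, path)
--     # roots pushed right-to-left so column 0 is expanded first
--     stack = [(1, i, energia[0][i], [i]) for i in range(len(energia[0]) - 1, -1, -1)]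
--     while stack:
--         fila, col, e, path = stack.pop()
--         # start columns (len(path) == 1) are never pruned, as in the reference
--         if len(path) > 1 and best is not None and best[0] <= e:
--             continue
--         if fila == n:
--             if best is None or e < best[0]:
--                 best = (e, path)
--             continue
--         row = energia[fila]
--         for i in (1, 0, -1):  # reversed, so col-1 is popped first
--             c = col + i
--             if 0 <= c < len(row):
--                 stack.append((fila + 1, c, e + row[c], path + [c]))
--     return best[1] if best else []
-- ===== Notes on version B (the rewrite author's own statement) =====
-- stated objective: alternative
-- what changed: A's mutating recursion with a shared best-so-far reference is replaced by an iterative depth-first search over an explicit stack of immutable frames (remaining row, column, energy, path), with the bound tested when a frame is popped; the asymptotics cannot improve because A's order-dependent pruning is unsound for negative energies (its exact result is not the DP optimum), so any exact re-implementation must replay the same pruned search.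
import Mathlib
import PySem

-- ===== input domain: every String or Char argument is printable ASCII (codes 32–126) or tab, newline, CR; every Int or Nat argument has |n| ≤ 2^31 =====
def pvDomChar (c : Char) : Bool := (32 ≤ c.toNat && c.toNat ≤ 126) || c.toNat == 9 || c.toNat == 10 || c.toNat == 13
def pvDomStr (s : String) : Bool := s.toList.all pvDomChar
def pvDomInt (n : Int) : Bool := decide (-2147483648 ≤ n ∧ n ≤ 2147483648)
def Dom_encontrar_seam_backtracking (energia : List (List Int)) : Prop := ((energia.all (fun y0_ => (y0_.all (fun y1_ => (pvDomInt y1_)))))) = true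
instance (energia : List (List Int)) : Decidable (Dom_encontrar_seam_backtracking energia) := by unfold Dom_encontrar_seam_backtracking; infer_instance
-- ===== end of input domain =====

-- B replaces A's mutating recursion by an iterative explicit-stack depth-first search with
-- pop-time bound test and immutable per-frame paths; same exploration order and bound, so
-- the return value is identical on every input (objective: alternative, no speed claim).

-- ===== PORT A =====
-- _func_aux_bt: rows = energia[fila:]; mejor = none models [math.inf, []];
-- the 'for i in [-1, 0, 1]' loop is unrolled into three sequential applications of step.
def auxBT (rows : List (List Int)) (colPrev : Int) (path : List Int) (eAct : Int)
    (mejor : Option (Int × List Int)) : Option (Int × List Int) :=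
  match rows with
  | [] =>
    match mejor with
    | none => some (eAct, path)
    | some (b, p) => if eAct < b then some (eAct, path) else some (b, p)
  | row :: rest =>
    let step := fun (mej : Option (Int × List Int)) (i : Int) =>
      let c := colPrev + i
      if c < 0 ∨ (row.length : Int) ≤ c then mej
      else
        let cost := row.getD c.toNat 0
        if (match mej with | some (b, _) => decide (b ≤ eAct + cost) | none => false)
        then mej
        else auxBT rest c (path ++ [c]) (eAct + cost) mej
    step (step (step mejor (-1)) 0) 1

def encontrar_seam_backtracking (energia : List (List Int)) : List Int :=
  match energia with
  | [] => []
  | first :: rest =>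
    if first.length = 0 then []
    else
      let mejor := (List.range first.length).foldl
        (fun mej (i : Nat) => auxBT rest (i : Int) [(i : Int)] (first.getD i 0) mej) none
      match mejor with
      | none => []
      | some (_, p) => p

-- ===== PORT B =====
-- a stack frame is (remaining rows, column, accumulated energy, path so far); frames are
-- popped from the FRONT of the list (Python pops from the end of a reversed-push list).
def pvMeasure (stack : List (List (List Int) × Int × Int × List Int)) : Nat :=
  (stack.map (fun fr => 2 * 3 ^ fr.1.length - 1)).sum

-- termination bookkeeping for runSeam: at most three children, each one row shorter
theorem pv_kids_bound (g : Int → Option (List (List Int) × Int × Int × List Int))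
    (rest : List (List Int)) (hg : ∀ i fr, g i = some fr → fr.1 = rest) (l : List Int) :
    ((l.filterMap g).map (fun fr => 2 * 3 ^ fr.1.length - 1)).sum
      ≤ l.length * (2 * 3 ^ rest.length - 1) := by
  induction l with
  | nil => simp
  | cons a t ih =>
    rw [List.filterMap_cons]
    cases h : g a with
    | none =>
      exact Nat.le_trans ih (Nat.mul_le_mul_right _ (Nat.le_succ _))
    | some fr =>
      have h1 : fr.1 = rest := hg a fr h
      simp only [List.map_cons, List.sum_cons, List.length_cons, h1]
      have h3 : (t.length + 1) * (2 * 3 ^ rest.length - 1)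
          = t.length * (2 * 3 ^ rest.length - 1) + (2 * 3 ^ rest.length - 1) := by ring
      omega

theorem pv_weight_pos (n : Nat) : 0 < 2 * 3 ^ n - 1 := by
  have : 0 < (3:Nat) ^ n := by positivity
  omega

def runSeam (stack : List (List (List Int) × Int × Int × List Int))
    (best : Option (Int × List Int)) : Option (Int × List Int) :=
  match stack with
  | [] => best
  | (rows, col, e, path) :: S =>
    if path.length > 1 && (match best with | some (b, _) => decide (b ≤ e) | none => false)
    then runSeam S best
    else
      match rows with
      | [] =>
        runSeam S (match best with
          | none => some (e, path)
          | some (b, p) => if e < b then some (e, path) else some (b, p))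
      | row :: rest =>
        let kids := [(-1 : Int), 0, 1].filterMap (fun i =>
          let c := col + i
          if c < 0 ∨ (row.length : Int) ≤ c then none
          else some (rest, c, e + row.getD c.toNat 0, path ++ [c]))
        runSeam (kids ++ S) best
termination_by pvMeasure stack
decreasing_by
  · simp only [pvMeasure, List.map_cons, List.sum_cons]
    exact Nat.lt_add_of_pos_left (pv_weight_pos _)
  · simp only [pvMeasure, List.map_cons, List.sum_cons]
    exact Nat.lt_add_of_pos_left (pv_weight_pos _)
  · simp only [pvMeasure, List.map_cons, List.sum_cons, List.map_append, List.sum_append]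
    refine lt_of_le_of_lt (Nat.add_le_add_right (pv_kids_bound _ rest ?_ _) _) ?_
    · intro i fr h
      by_cases hc : col + i < 0 ∨ (row.length : Int) ≤ col + i
      · simp [hc] at h
      · rw [dif_neg hc] at h
        rcases Option.some.inj h with rfl
        rfl
    · have h0 : 0 < (3:Nat) ^ rest.length := by positivity
      simp only [List.length_cons, List.length_nil]
      omega

def encontrar_seam_backtracking_alt (energia : List (List Int)) : List Int :=
  match energia with
  | [] => []
  | first :: rest =>
    if first.length = 0 then []
    else
      let roots := (List.range first.length).map
        (fun (i : Nat) => (rest, (i : Int), first.getD i 0, [(i : Int)]))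
      match runSeam roots none with
      | none => []
      | some (_, p) => p

-- ===== PRECONDITION & SPEC =====
def Spec_encontrar_seam_backtracking (energia : List (List Int)) (out : List Int) : Prop := out = encontrar_seam_backtracking_alt energia
instance (energia : List (List Int)) (out : List Int) : Decidable (Spec_encontrar_seam_backtracking energia out) := by unfold Spec_encontrar_seam_backtracking; infer_instance

-- ===== CLAIM (what is proved, stated in full; the proofs are below) =====
def Claim_equal_encontrar_seam_backtracking : Prop := ∀ (energia : List (List Int)), Dom_encontrar_seam_backtracking energia → Spec_encontrar_seam_backtracking energia (encontrar_seam_backtracking energia)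

-- ===== LEMMAS AND PROOFS =====

-- popping one frame whose path is nonempty behaves like one call of A's recursive helper,
-- guarded by the pop-time bound test
theorem runSeam_pop (rows : List (List Int)) (col : Int) (e : Int) (path : List Int)
    (S : List (List (List Int) × Int × Int × List Int)) (best : Option (Int × List Int))
    (hp : path ≠ []) :
    runSeam ((rows, col, e, path) :: S) best =
      runSeam S (if path.length > 1 && (match best with | some (b, _) => decide (b ≤ e) | none => false)
                 then best else auxBT rows col path e best) := by
  induction rows generalizing col e path S best with
  | nil =>
    rw [runSeam.eq_def]
    by_cases hg : (path.length > 1 && (match best with | some (b, _) => decide (b ≤ e) | none => false)) = true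
    · simp only [hg, if_true]
    · simp only [Bool.not_eq_true] at hg
      simp only [hg, Bool.false_eq_true, if_false, auxBT]
  | cons row rest ih =>
    rw [runSeam.eq_def]
    by_cases hg : (path.length > 1 && (match best with | some (b, _) => decide (b ≤ e) | none => false)) = true
    · simp only [hg, if_true]
    · simp only [Bool.not_eq_true] at hg
      simp only [hg, Bool.false_eq_true, if_false]
      -- peel the three children one at a time with ih
      have hchild : ∀ (i : Int) (b : Option (Int × List Int))
          (S' : List (List (List Int) × Int × Int × List Int)),
          runSeam (([i].filterMap (fun i =>
              let c := col + i
              if c < 0 ∨ (row.length : Int) ≤ c then none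
              else some (rest, c, e + row.getD c.toNat 0, path ++ [c]))) ++ S') b =
          runSeam S'
            (let c := col + i
             if c < 0 ∨ (row.length : Int) ≤ c then b
             else
               let cost := row.getD c.toNat 0
               if (match b with | some (bb, _) => decide (bb ≤ e + cost) | none => false)
               then b
               else auxBT rest c (path ++ [c]) (e + cost) b) := by
        intro i b S'
        by_cases hc : col + i < 0 ∨ (row.length : Int) ≤ col + i
        · simp [hc]
        · simp only [List.filterMap_cons, List.filterMap_nil]
          rw [if_neg hc]
          rw [List.singleton_append, ih (col + i) (e + row.getD (col + i).toNat 0)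
            (path ++ [col + i]) S' b (by simp)]
          have hl : ((path ++ [col + i]).length > 1) = True := by
            have : path.length ≠ 0 := by simpa using hp
            simp only [List.length_append, List.length_cons, List.length_nil, gt_iff_lt]
            exact eq_true (by omega)
          simp only [hc, if_false, hl, decide_true, Bool.true_and]
      show runSeam _ best = runSeam S (auxBT (row :: rest) col path e best)
      have hsplit : [(-1 : Int), 0, 1].filterMap (fun i =>
            let c := col + i
            if c < 0 ∨ (row.length : Int) ≤ c then none
            else some (rest, c, e + row.getD c.toNat 0, path ++ [c]))
          = ([(-1 : Int)].filterMap (fun i =>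
              let c := col + i
              if c < 0 ∨ (row.length : Int) ≤ c then none
              else some (rest, c, e + row.getD c.toNat 0, path ++ [c])))
            ++ ([(0 : Int)].filterMap (fun i =>
              let c := col + i
              if c < 0 ∨ (row.length : Int) ≤ c then none
              else some (rest, c, e + row.getD c.toNat 0, path ++ [c])))
            ++ ([(1 : Int)].filterMap (fun i =>
              let c := col + i
              if c < 0 ∨ (row.length : Int) ≤ c then none
              else some (rest, c, e + row.getD c.toNat 0, path ++ [c]))) := by
        simp only [← List.filterMap_append]
        rfl
      rw [hsplit, List.append_assoc, List.append_assoc, hchild, hchild, hchild]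
      rfl

-- the initial stack of start columns folds exactly like A's top-level loop
theorem runSeam_roots (rest : List (List Int)) (first : List Int) (is : List Nat)
    (best : Option (Int × List Int)) :
    runSeam (is.map (fun (i : Nat) => (rest, (i : Int), first.getD i 0, [(i : Int)]))) best =
      is.foldl (fun mej (i : Nat) => auxBT rest (i : Int) [(i : Int)] (first.getD i 0) mej) best := by
  induction is generalizing best with
  | nil => rw [List.map_nil, runSeam.eq_def, List.foldl_nil]
  | cons i t ih =>
    rw [List.map_cons, runSeam_pop _ _ _ _ _ _ (by simp), List.foldl_cons, ih]
    norm_num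

-- ===== VERDICT (by name: the statement is the Claim_ definition above) =====
theorem encontrar_seam_backtracking_spec : Claim_equal_encontrar_seam_backtracking := by
  intro energia _
  unfold Spec_encontrar_seam_backtracking
  unfold encontrar_seam_backtracking encontrar_seam_backtracking_alt
  match energia with
  | [] => rfl
  | first :: rest =>
    by_cases h : first.length = 0
    · simp [h]
    · simp only [h, if_false]
      rw [runSeam_roots]
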